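-- pv_equiv track=rewrite | github.com/mingjun1120/FYP | Page_Flipping.py | find2ndLastIndex
-- ===== SOURCE A (Python) =====
-- def find2ndLastIndex(text, x):
--     count = 0
--     # Traverse from right
--     for i in range(len(text) - 1, -1, -1):
--         if text[i] == x:
--             count += 1
--             if count == 2:
--                 return i
--     return -1
-- ===== SOURCE B (Python) =====
-- def find2ndLastIndex(text, x):
--     indices = [i for i in range(len(text)) if text[i] == x]
--     return indices[-2] if len(indices) >= 2 else -1
-- ===== Notes on version B (the rewrite author's own statement) =====
-- stated objective: simpler
-- what changed: Replaces the right-to-left counting scan with early return by a single forward collection of all matching positions followed by a direct indices[-2] lookup.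
import Mathlib
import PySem

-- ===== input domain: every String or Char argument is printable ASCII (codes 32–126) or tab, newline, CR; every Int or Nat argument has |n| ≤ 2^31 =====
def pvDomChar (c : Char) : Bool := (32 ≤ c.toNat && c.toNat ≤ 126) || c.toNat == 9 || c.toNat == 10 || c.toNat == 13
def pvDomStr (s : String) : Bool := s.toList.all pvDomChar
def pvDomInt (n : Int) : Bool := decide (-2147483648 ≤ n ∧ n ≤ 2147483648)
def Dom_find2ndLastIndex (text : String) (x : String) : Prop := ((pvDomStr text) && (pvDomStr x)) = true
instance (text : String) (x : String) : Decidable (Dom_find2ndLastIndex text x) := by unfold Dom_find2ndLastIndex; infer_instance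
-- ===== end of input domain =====

-- B collects all matching positions in one forward pass and returns indices[-2]; simpler than A's
-- right-to-left counting scan. Equivalence is exact on all inputs.

-- 'text[i] == x' of Python: the character at index i (as a one-char string) compared with x.
-- Out of range (never reached by either port on its index lists) yields false here.
def pvCharEqAt (cs : List Char) (x : String) (i : Int) : Bool :=
  match PySem.List.pyGet? cs i with
  | some c => x == String.ofList [c]
  | none => false

-- ===== PORT A =====
-- the for-loop with 'count' and early return, over range(len(text)-1, -1, -1)
def find2ndLastIndexGo (cs : List Char) (x : String) (count : Int) : List Int → Int
  | [] => -1
  | i :: rest =>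
    if pvCharEqAt cs x i then
      if count + 1 = 2 then i
      else find2ndLastIndexGo cs x (count + 1) rest
    else find2ndLastIndexGo cs x count rest

def find2ndLastIndex (text : String) (x : String) : Int :=
  find2ndLastIndexGo text.toList x 0
    (PySem.List.pyRange ((text.toList.length : Int) - 1) (-1) (-1))

-- ===== PORT B =====
def find2ndLastIndex_alt (text : String) (x : String) : Int :=
  let cs := text.toList
  let indices := (PySem.List.pyRange 0 (cs.length : Int) 1).filter (pvCharEqAt cs x)
  if 2 ≤ indices.length then (PySem.List.pyGet? indices (-2)).getD (-1) else -1

-- ===== PRECONDITION & SPEC =====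
def Spec_find2ndLastIndex (text : String) (x : String) (out : Int) : Prop := out = find2ndLastIndex_alt text x
instance (text : String) (x : String) (out : Int) : Decidable (Spec_find2ndLastIndex text x out) := by unfold Spec_find2ndLastIndex; infer_instance

-- ===== CLAIM (what is proved, stated in full; the proofs are below) =====
def Claim_equal_find2ndLastIndex : Prop := ∀ (text : String) (x : String), Dom_find2ndLastIndex text x → Spec_find2ndLastIndex text x (find2ndLastIndex text x)

-- ===== LEMMAS AND PROOFS =====

-- A's loop with count = 1 returns the first matching index of the remaining list (or -1)
theorem find2ndLastIndexGo_one (cs : List Char) (x : String) (l : List Int) :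
    find2ndLastIndexGo cs x 1 l =
      match l.filter (pvCharEqAt cs x) with
      | [] => -1
      | a :: _ => a := by
  induction l with
  | nil => simp [find2ndLastIndexGo]
  | cons i rest ih =>
    by_cases h : pvCharEqAt cs x i = true
    · simp [find2ndLastIndexGo, h]
    · simp [find2ndLastIndexGo, h, ih]

-- A's loop with count = 0 returns the second matching index of the remaining list (or -1)
theorem find2ndLastIndexGo_zero (cs : List Char) (x : String) (l : List Int) :
    find2ndLastIndexGo cs x 0 l =
      match l.filter (pvCharEqAt cs x) with
      | a :: b :: _ => b
      | _ => -1 := by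
  induction l with
  | nil => simp [find2ndLastIndexGo]
  | cons i rest ih =>
    by_cases h : pvCharEqAt cs x i = true
    · simp only [find2ndLastIndexGo, h, if_true, List.filter_cons]
      norm_num
      rw [find2ndLastIndexGo_one]
      cases List.filter (pvCharEqAt cs x) rest <;> simp
    · simp only [find2ndLastIndexGo, h, Bool.false_eq_true,
        List.filter_cons, ih]
      simp [h]

-- the second element of l.reverse is l[-2]
theorem secondOf_reverse (l : List Int) :
    (match l.reverse with | a :: b :: _ => b | _ => -1)
      = if 2 ≤ l.length then (PySem.List.pyGet? l (-2)).getD (-1) else -1 := by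
  rcases hrev : l.reverse with _ | ⟨a, _ | ⟨b, t⟩⟩
  · have : l.length = 0 := by simpa using congrArg List.length hrev
    simp [this]
  · have : l.length = 1 := by simpa using congrArg List.length hrev
    simp [this]
  · have hlen : l.length = t.length + 2 := by simpa using congrArg List.length hrev
    have hget : PySem.List.pyGet? l (-2) = l[l.length - 2]? :=
      PySem.List.pyGet?_neg_ofNat l 2 (by omega) (by omega)
    have h1 : (1 : Nat) < l.reverse.length := by simp [hlen]
    have hidx : l[l.length - 2]? = some l.reverse[1] := by
      rw [List.getElem?_eq_getElem (by omega), List.getElem_reverse]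
      simp [Nat.sub_sub]
    have hb : l.reverse[1] = b := by simp [hrev]
    rw [if_pos (by omega), hget, hidx, Option.getD_some, hb]

-- ===== VERDICT (by name: the statement is the Claim_ definition above) =====
theorem find2ndLastIndex_spec : Claim_equal_find2ndLastIndex := by
  intro text x _
  show find2ndLastIndex text x = find2ndLastIndex_alt text x
  unfold find2ndLastIndex find2ndLastIndex_alt
  simp only []
  rw [show PySem.List.pyRange ((text.toList.length : Int) - 1) (-1) (-1)
        = (PySem.List.pyRange 0 (text.toList.length : Int) 1).reverse by
      rw [PySem.List.pyRange_neg_one_eq_reverse]; norm_num,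
    find2ndLastIndexGo_zero, List.filter_reverse, secondOf_reverse]
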